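-- pv_equiv track=rewrite | github.com/KisalRojitha/LinearProgramming | Krt_LP/preProcessLP.py | checkBasicPos
-- ===== SOURCE A (Python) =====
-- def checkBasicPos(arr):
--     arr2 = []
--         #this check elements in each row and  check  wether their particular coloumn's only value is itself only
--     for i in range(len(arr)):
--         basic_found =False
--         for j in range(len(arr[i])):
--             if(arr[i][j] != 1):
--
--                 continue
--             else:
--
--                 for k in range(len(arr)):
--                     if(arr[k][j] != 0 and k != i):
--
--                         break
--
--                     if(k == len(arr)-1):
--                         basic_found =True
--                         xy = []
--                         xy.append(i)
--                         xy.append(j)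
--                         arr2.append(xy)
--     return arr2
-- ===== SOURCE B (Python) =====
-- def checkBasicPos(arr):
--     if not arr:
--         return []
--     m = min(len(row) for row in arr)
--     # one pass: owner[j] = row of the single 1 in column j, -1 = all zeros so far, -2 = not a unit column
--     owner = [-1] * m
--     for k, row in enumerate(arr):
--         for j in range(m):
--             v = row[j]
--             if v != 0:
--                 owner[j] = k if (owner[j] == -1 and v == 1) else -2
--     res = []
--     for i in range(len(arr)):
--         for j in range(m):
--             if owner[j] == i:
--                 res.append([i, j])
--     return res
-- ===== Notes on version B (the rewrite author's own statement) =====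
-- stated objective: alternative
-- what changed: A rescans the whole column (an inner loop over all rows) for every 1-cell of every row; B makes one pass over the matrix recording each column's unit-owner row in an owner array, then emits the [row,col] pairs, removing the inner rescan.
import Mathlib
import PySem

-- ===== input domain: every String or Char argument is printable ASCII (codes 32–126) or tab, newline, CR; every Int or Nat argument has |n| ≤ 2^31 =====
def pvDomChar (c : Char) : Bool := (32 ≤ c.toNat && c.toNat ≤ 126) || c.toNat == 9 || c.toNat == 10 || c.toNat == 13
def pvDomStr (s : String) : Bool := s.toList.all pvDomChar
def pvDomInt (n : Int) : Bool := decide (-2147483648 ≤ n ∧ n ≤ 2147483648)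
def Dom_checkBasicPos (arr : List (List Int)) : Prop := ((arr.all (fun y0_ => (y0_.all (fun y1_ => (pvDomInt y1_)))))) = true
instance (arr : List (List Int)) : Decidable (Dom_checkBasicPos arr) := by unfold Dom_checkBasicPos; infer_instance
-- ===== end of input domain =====

-- B replaces A's per-cell column rescan by a single pass that records each column's
-- unit-owner row in an owner array, then emits the pairs; objective: alternative algorithm.
-- Indices produced by `range` are nonnegative and in range, so `List.getD` is exact for them;
-- only A's access arr[k][j] can go out of range, exactly where Python raises IndexError —
-- those inputs are excluded by Pre_checkBasicPos.

-- ===== PORT A =====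
-- the inner `for k in range(len(arr))` loop with its break; returns true iff the append fired
def kLoopA (arr : List (List Int)) (i j : Nat) : List Nat → Bool
  | [] => false
  | k :: ks =>
    if (arr.getD k []).getD j 0 ≠ 0 ∧ k ≠ i then false
    else if k = arr.length - 1 then true
    else kLoopA arr i j ks

def checkBasicPos (arr : List (List Int)) : List (List Int) :=
  (List.range arr.length).foldl
    (fun arr2 i =>
      ((List.range ((arr.getD i []).length)).foldl
        (fun st j =>
          if (arr.getD i []).getD j 0 ≠ 1 then st
          else if kLoopA arr i j (List.range arr.length) then (true, st.2 ++ [[(i : Int), (j : Int)]])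
          else st)
        ((false, arr2) : Bool × List (List Int))).2)
    []

-- ===== PORT B =====
-- owner[j] update for one cell: -1 = only zeros so far, k = single 1 at row k, -2 = dead column
def bodyB (k : Int) (row : List Int) (ow : List Int) (j : Nat) : List Int :=
  if row.getD j 0 ≠ 0 then ow.set j (if ow.getD j 0 = -1 ∧ row.getD j 0 = 1 then k else -2) else ow

def scanRowB (m : Nat) (ow : List Int) (kr : Int × List Int) : List Int :=
  (List.range m).foldl (bodyB kr.1 kr.2) ow

def checkBasicPos_alt (arr : List (List Int)) : List (List Int) :=
  if arr.isEmpty then []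
  else
    let m := (PySem.List.min? (arr.map List.length) (fun x => x)).getD 0
    let owner := (PySem.List.enumerate arr).foldl (scanRowB m) (List.replicate m (-1 : Int))
    (List.range arr.length).foldl
      (fun (res : List (List Int)) (i : Nat) =>
        (List.range m).foldl
          (fun (res : List (List Int)) (j : Nat) =>
            if owner.getD j 0 = (i : Int) then res ++ [[(i : Int), (j : Int)]] else res)
          res)
      []

-- ===== PRECONDITION & SPEC =====
-- Pre_ excludes exactly the ragged inputs on which Python A raises IndexError: a 1 in row i at a
-- column j that some row k lacks, with no earlier row breaking the k-scan before it reaches row k.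
def Pre_checkBasicPos (arr : List (List Int)) : Prop :=
  ∀ i < arr.length, ∀ j < (arr.getD i []).length,
    (arr.getD i []).getD j 0 = 1 →
    ∀ k < arr.length, (arr.getD k []).length ≤ j →
      ∃ k' < k, k' ≠ i ∧ j < (arr.getD k' []).length ∧ (arr.getD k' []).getD j 0 ≠ 0

instance (arr : List (List Int)) : Decidable (Pre_checkBasicPos arr) := by
  unfold Pre_checkBasicPos
  have : ∀ i k j : Nat,
      Decidable (∃ k' < k, k' ≠ i ∧ j < (arr.getD k' []).length ∧ (arr.getD k' []).getD j 0 ≠ 0) := by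
    intro i k j; infer_instance
  infer_instance

def pvWitness_checkBasicPos : List (List Int) := [[1, 0], [0, 1]]

def Spec_checkBasicPos (arr : List (List Int)) (out : List (List Int)) : Prop := out = checkBasicPos_alt arr
instance (arr : List (List Int)) (out : List (List Int)) : Decidable (Spec_checkBasicPos arr out) := by unfold Spec_checkBasicPos; infer_instance

-- ===== CLAIM (what is proved, stated in full; the proofs are below) =====
def Claim_equal_checkBasicPos : Prop := ∀ (arr : List (List Int)), Dom_checkBasicPos arr → Pre_checkBasicPos arr → Spec_checkBasicPos arr (checkBasicPos arr)

-- ===== LEMMAS AND PROOFS =====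

-- column value and row length shorthands
def Gv (arr : List (List Int)) (k j : Nat) : Int := (arr.getD k []).getD j 0
def rlen (arr : List (List Int)) (k : Nat) : Nat := (arr.getD k []).length
-- min row length and the owner array of port B, for stating the lemmas
def mval (arr : List (List Int)) : Nat := (PySem.List.min? (arr.map List.length) (fun x => x)).getD 0
def ownerOf (arr : List (List Int)) : List Int :=
  (PySem.List.enumerate arr).foldl (scanRowB (mval arr)) (List.replicate (mval arr) (-1 : Int))
-- the per-column state transition of B's scan
def colStep (k o v : Int) : Int := if v ≠ 0 then (if o = -1 ∧ v = 1 then k else -2) else o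

theorem kLoopA_spec (arr : List (List Int)) (i j : Nat) :
    ∀ d t, t < arr.length → d = arr.length - t →
    (kLoopA arr i j (List.range' t d) = true ↔
      ∀ k, t ≤ k → k < arr.length → k ≠ i → Gv arr k j = 0) := by
  intro d
  induction d with
  | zero => intro t ht hd; omega
  | succ d ih =>
    intro t ht hd
    rw [List.range'_succ]
    unfold kLoopA
    simp only [Gv]
    by_cases hbr : (arr.getD t []).getD j 0 ≠ 0 ∧ t ≠ i
    · rw [if_pos hbr]
      constructor
      · intro h; exact absurd h (by simp)
      · intro h; exact absurd (h t le_rfl ht hbr.2) hbr.1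
    · rw [if_neg hbr]
      by_cases hlast : t = arr.length - 1
      · rw [if_pos hlast]
        simp only [true_iff]
        intro k hk1 hk2 hk3
        have : k = t := by omega
        subst this
        rcases not_and_or.mp hbr with h | h
        · exact not_not.mp h
        · exact absurd hk3 h
      · rw [if_neg hlast]
        have ht1 : t + 1 < arr.length := by omega
        rw [ih (t + 1) ht1 (by omega)]
        constructor
        · intro h k hk1 hk2 hk3
          rcases Nat.eq_or_lt_of_le hk1 with h0 | h0
          · subst h0
            rcases not_and_or.mp hbr with hh | hh
            · exact not_not.mp hh
            · exact absurd hk3 hh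
          · exact h k h0 hk2 hk3
        · intro h k hk1 hk2 hk3
          exact h k (by omega) hk2 hk3

theorem innerA_spec (arr : List (List Int)) (i : Nat) :
    ∀ (js : List Nat) (bf : Bool) (acc : List (List Int)),
    (js.foldl
      (fun st j =>
        if (arr.getD i []).getD j 0 ≠ 1 then st
        else if kLoopA arr i j (List.range arr.length) then (true, st.2 ++ [[(i : Int), (j : Int)]])
        else st)
      ((bf, acc) : Bool × List (List Int))).2
    = acc ++ (js.filter (fun j => ((arr.getD i []).getD j 0 == 1) && kLoopA arr i j (List.range arr.length))).map
        (fun j : Nat => [(i : Int), (j : Int)]) := by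
  intro js
  induction js with
  | nil =>
    intro bf acc
    simp only [List.foldl_nil, List.filter_nil, List.map_nil, List.append_nil]
  | cons t ts ih =>
    intro bf acc
    simp only [List.foldl_cons, List.filter_cons]
    by_cases h1 : (arr.getD i []).getD t 0 ≠ 1
    · have hb : (((arr.getD i []).getD t 0 == 1) && kLoopA arr i t (List.range arr.length)) = false := by
        rw [Bool.and_eq_false_iff]; left; rwa [beq_eq_false_iff_ne]
      rw [if_pos h1, ih, hb, if_neg (by simp : ¬(false = true))]
    · rw [not_ne_iff] at h1
      by_cases h2 : kLoopA arr i t (List.range arr.length) = true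
      · have hb : (((arr.getD i []).getD t 0 == 1) && kLoopA arr i t (List.range arr.length)) = true := by
          rw [Bool.and_eq_true]; exact ⟨by rwa [beq_iff_eq], h2⟩
        rw [if_neg (by simpa using h1), if_pos h2, ih, hb, if_pos rfl]
        simp
      · have hb : (((arr.getD i []).getD t 0 == 1) && kLoopA arr i t (List.range arr.length)) = false := by
          rw [Bool.and_eq_false_iff]; right; rwa [Bool.not_eq_true] at h2
        rw [if_neg (by simpa using h1), if_neg h2, ih, hb, if_neg (by simp : ¬(false = true))]

theorem A_closed (arr : List (List Int)) :
    checkBasicPos arr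
    = (List.range arr.length).flatMap
        (fun i => ((List.range ((arr.getD i []).length)).filter
            (fun j => ((arr.getD i []).getD j 0 == 1) && kLoopA arr i j (List.range arr.length))).map
          (fun j : Nat => [(i : Int), (j : Int)])) := by
  unfold checkBasicPos
  have hbody : (fun (arr2 : List (List Int)) (i : Nat) =>
      ((List.range ((arr.getD i []).length)).foldl
        (fun st j =>
          if (arr.getD i []).getD j 0 ≠ 1 then st
          else if kLoopA arr i j (List.range arr.length) then (true, st.2 ++ [[(i : Int), (j : Int)]])
          else st)
        ((false, arr2) : Bool × List (List Int))).2)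
      = fun (arr2 : List (List Int)) (i : Nat) => arr2 ++ ((List.range ((arr.getD i []).length)).filter
          (fun j => ((arr.getD i []).getD j 0 == 1) && kLoopA arr i j (List.range arr.length))).map
          (fun j : Nat => [(i : Int), (j : Int)]) := by
    funext arr2 i
    exact innerA_spec arr i _ false arr2
  rw [hbody, PySem.List.foldl_append_eq_flatMap]
  simp

theorem bodyB_length (k : Int) (row ow : List Int) (j : Nat) :
    (bodyB k row ow j).length = ow.length := by
  unfold bodyB
  split <;> simp

theorem foldl_bodyB_length (k : Int) (row : List Int) :
    ∀ (js : List Nat) (ow : List Int), (js.foldl (bodyB k row) ow).length = ow.length := by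
  intro js
  induction js with
  | nil => intro ow; rfl
  | cons t ts ih => intro ow; simp only [List.foldl_cons]; rw [ih, bodyB_length]

theorem foldl_bodyB_notmem (k : Int) (row : List Int) :
    ∀ (js : List Nat) (ow : List Int) (j : Nat), j ∉ js →
    (js.foldl (bodyB k row) ow).getD j 0 = ow.getD j 0 := by
  intro js
  induction js with
  | nil => intro ow j h; rfl
  | cons t ts ih =>
    intro ow j h
    simp only [List.mem_cons, not_or] at h
    simp only [List.foldl_cons]
    rw [ih _ _ h.2]
    unfold bodyB
    split
    · simp [List.getD_eq_getElem?_getD, List.getElem?_set_ne (show t ≠ j by omega)]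
    · rfl

theorem bodyB_get_self (k : Int) (row ow : List Int) (j : Nat) (hj : j < ow.length) :
    (bodyB k row ow j).getD j 0 = colStep k (ow.getD j 0) (row.getD j 0) := by
  unfold bodyB colStep
  split
  · rw [List.getD_eq_getElem?_getD, List.getElem?_set_self hj]; simp
  · rfl

theorem scanRowB_get (k : Int) (row : List Int) (m : Nat) (ow : List Int) (j : Nat)
    (hj : j < m) (hlen : ow.length = m) :
    (scanRowB m ow (k, row)).getD j 0 = colStep k (ow.getD j 0) (row.getD j 0) := by
  unfold scanRowB
  have hsplit : List.range m = List.range (j + 1) ++ (List.range (m - (j + 1))).map (j + 1 + ·) := by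
    rw [← List.range_add]; congr 1; omega
  have hsplit2 : List.range (j + 1) = List.range j ++ [j] := List.range_succ
  rw [hsplit, List.foldl_append, hsplit2, List.foldl_append]
  have hnm1 : j ∉ List.range j := by simp
  have h1 : ((List.range j).foldl (bodyB k row) ow).getD j 0 = ow.getD j 0 :=
    foldl_bodyB_notmem _ _ _ _ _ hnm1
  have hlen1 : ((List.range j).foldl (bodyB k row) ow).length = ow.length :=
    foldl_bodyB_length _ _ _ _
  have h2 : (([j].foldl (bodyB k row) ((List.range j).foldl (bodyB k row) ow))).getD j 0
      = colStep k (ow.getD j 0) (row.getD j 0) := by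
    simp only [List.foldl_cons, List.foldl_nil]
    rw [bodyB_get_self _ _ _ _ (by rw [hlen1, hlen]; exact hj), h1]
  have hnm2 : j ∉ (List.range (m - (j + 1))).map (j + 1 + ·) := by
    simp; omega
  rw [foldl_bodyB_notmem _ _ _ _ _ hnm2, h2]

theorem scanRowB_length (m : Nat) (ow : List Int) (kr : Int × List Int) :
    (scanRowB m ow kr).length = ow.length := by
  unfold scanRowB; exact foldl_bodyB_length _ _ _ _

theorem owner_get (m : Nat) :
    ∀ (es : List (Int × List Int)) (ow : List Int), ow.length = m → ∀ j, j < m →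
    ((es.foldl (scanRowB m) ow).getD j 0
      = es.foldl (fun o kr => colStep kr.1 o (kr.2.getD j 0)) (ow.getD j 0)) := by
  intro es
  induction es with
  | nil => intro ow hlen j hj; rfl
  | cons e es ih =>
    intro ow hlen j hj
    simp only [List.foldl_cons]
    rw [ih _ (by rw [scanRowB_length]; exact hlen) j hj]
    congr 1
    obtain ⟨k, row⟩ := e
    exact scanRowB_get k row m ow j hj hlen

theorem colFold_neg2 (j : Nat) (es : List (Int × List Int)) :
    es.foldl (fun o kr => colStep kr.1 o (kr.2.getD j 0)) (-2) = -2 := by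
  induction es with
  | nil => rfl
  | cons e es ih =>
    simp only [List.foldl_cons]
    have : colStep e.1 (-2) (e.2.getD j 0) = -2 := by
      unfold colStep; split <;> simp
    rw [this, ih]

theorem colFold_nonneg (j : Nat) (es : List (Int × List Int)) (o : Int) (ho : 0 ≤ o) :
    (es.foldl (fun o kr => colStep kr.1 o (kr.2.getD j 0)) o = o ∧ ∀ kr ∈ es, kr.2.getD j 0 = 0)
    ∨ (es.foldl (fun o kr => colStep kr.1 o (kr.2.getD j 0)) o = -2 ∧ ∃ kr ∈ es, kr.2.getD j 0 ≠ 0) := by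
  induction es generalizing o with
  | nil => left; simp
  | cons e es ih =>
    simp only [List.foldl_cons]
    by_cases hv : e.2.getD j 0 = 0
    · have hstep : colStep e.1 o (e.2.getD j 0) = o := by
        unfold colStep; rw [hv]; simp
      rw [hstep]
      rcases ih o ho with ⟨h1, h2⟩ | ⟨h1, h2⟩
      · left
        refine ⟨h1, ?_⟩
        intro kr hkr
        rcases List.mem_cons.mp hkr with h | h
        · rw [h]; exact hv
        · exact h2 _ h
      · right
        refine ⟨h1, ?_⟩
        obtain ⟨kr, hkr, hne⟩ := h2
        exact ⟨kr, List.mem_cons_of_mem _ hkr, hne⟩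
    · have hstep : colStep e.1 o (e.2.getD j 0) = -2 := by
        unfold colStep
        rw [if_pos hv, if_neg]
        rintro ⟨h1, -⟩; omega
      rw [hstep, colFold_neg2]
      exact Or.inr ⟨rfl, e, by simp, hv⟩

theorem getD_idx (rs : List (List Int)) (u : Nat) (hu : u < rs.length) :
    rs.getD u [] = rs[u] := by
  rw [List.getD_eq_getElem?_getD, List.getElem?_eq_getElem hu]; rfl

theorem enum_all_zero (j : Nat) (rs : List (List Int)) (s : Int) :
    (∀ kr ∈ PySem.List.enumerate rs s, kr.2.getD j 0 = 0) ↔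
      (∀ u, u < rs.length → (rs.getD u []).getD j 0 = 0) := by
  constructor
  · intro h u hu
    have hmem : ((s + u, rs[u]) : Int × List Int) ∈ PySem.List.enumerate rs s :=
      (PySem.List.mem_enumerate_iff rs s _).mpr ⟨u, hu, rfl⟩
    have := h _ hmem
    rwa [getD_idx rs u hu]
  · intro h kr hkr
    obtain ⟨u, hu, rfl⟩ := (PySem.List.mem_enumerate_iff rs s kr).mp hkr
    have := h u hu
    rwa [getD_idx rs u hu] at this

theorem colFold_enum (j : Nat) :
    ∀ (rs : List (List Int)) (s i : Nat),
    ((PySem.List.enumerate rs (s : Int)).foldl (fun o kr => colStep kr.1 o (kr.2.getD j 0)) (-1) = (i : Int) ↔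
      ∃ t, t < rs.length ∧ i = s + t ∧ (rs.getD t []).getD j 0 = 1 ∧
        ∀ u, u < rs.length → u ≠ t → (rs.getD u []).getD j 0 = 0) := by
  intro rs
  induction rs with
  | nil =>
    intro s i
    rw [PySem.List.enumerate_nil]
    simp only [List.foldl_nil, List.length_nil]
    constructor
    · intro h; exfalso; omega
    · rintro ⟨t, ht, -⟩; omega
  | cons row rs ih =>
    intro s i
    rw [PySem.List.enumerate_cons]
    simp only [List.foldl_cons]
    have hcast : (s : Int) + 1 = ((s + 1 : Nat) : Int) := by push_cast; ring
    by_cases hv0 : row.getD j 0 = 0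
    · have hstep : colStep (s : Int) (-1) (row.getD j 0) = -1 := by
        unfold colStep; rw [hv0]; simp
      rw [hstep, hcast, ih (s + 1) i]
      constructor
      · rintro ⟨t, ht, hi, h1, h0⟩
        refine ⟨t + 1, by simpa using ht, by omega, by simpa using h1, ?_⟩
        intro u hu hut
        cases u with
        | zero => simpa using hv0
        | succ u' =>
          have := h0 u' (by simpa using hu) (by omega)
          simpa using this
      · rintro ⟨t, ht, hi, h1, h0⟩
        cases t with
        | zero =>
          rw [List.getD_cons_zero] at h1
          exact absurd h1 (by rw [hv0]; norm_num)
        | succ t' =>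
          refine ⟨t', by simpa using ht, by omega, by simpa using h1, ?_⟩
          intro u hu hut
          have := h0 (u + 1) (by simpa using hu) (by omega)
          simpa using this
    · by_cases hv1 : row.getD j 0 = 1
      · have hstep : colStep (s : Int) (-1) (row.getD j 0) = (s : Int) := by
          unfold colStep; rw [hv1]; norm_num
        rw [hstep, hcast]
        rcases colFold_nonneg j (PySem.List.enumerate rs ((s + 1 : Nat) : Int)) (s : Int)
            (by positivity) with ⟨h1, h2⟩ | ⟨h1, h2⟩
        · rw [h1]
          have hz := (enum_all_zero j rs ((s + 1 : Nat) : Int)).mp h2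
          constructor
          · intro hsi
            have hsi' : i = s := by exact_mod_cast hsi.symm
            refine ⟨0, by simp, by omega, by simpa using hv1, ?_⟩
            intro u hu hut
            cases u with
            | zero => omega
            | succ u' =>
              have := hz u' (by simpa using hu)
              simpa using this
          · rintro ⟨t, ht, hi, h1t, h0t⟩
            cases t with
            | zero => exact_mod_cast congrArg (fun n : Nat => (n : Int)) (by omega : s = i)
            | succ t' =>
              exfalso
              have := h0t 0 (by simp) (by omega)
              rw [List.getD_cons_zero] at this
              exact hv0 this
        · rw [h1]
          constructor
          · intro h; exfalso; omega
          · rintro ⟨t, ht, hi, h1t, h0t⟩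
            exfalso
            obtain ⟨kr, hkr, hne⟩ := h2
            obtain ⟨u, hu, rfl⟩ := (PySem.List.mem_enumerate_iff rs _ kr).mp hkr
            cases t with
            | zero =>
              have := h0t (u + 1) (by simpa using hu) (by omega)
              rw [List.getD_cons_succ, getD_idx rs u hu] at this
              exact hne this
            | succ t' =>
              have := h0t 0 (by simp) (by omega)
              rw [List.getD_cons_zero] at this
              exact hv0 this
      · have hstep : colStep (s : Int) (-1) (row.getD j 0) = -2 := by
          unfold colStep
          rw [if_pos hv0, if_neg]
          rintro ⟨-, h⟩; exact hv1 h
        rw [hstep, colFold_neg2]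
        constructor
        · intro h; exfalso; omega
        · rintro ⟨t, ht, hi, h1t, h0t⟩
          exfalso
          cases t with
          | zero => rw [List.getD_cons_zero] at h1t; exact hv1 h1t
          | succ t' =>
            have := h0t 0 (by simp) (by omega)
            rw [List.getD_cons_zero] at this
            exact hv0 this

theorem mval_lt_iff (arr : List (List Int)) (hne : arr ≠ []) (j : Nat) :
    j < mval arr ↔ ∀ k < arr.length, j < rlen arr k := by
  unfold mval rlen
  have hne2 : arr.map List.length ≠ [] := by simpa using hne
  cases hmin : PySem.List.min? (arr.map List.length) (fun x => x) with
  | none => rw [PySem.List.min?_eq_none_iff] at hmin; exact absurd hmin hne2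
  | some v =>
    have hmem := PySem.List.min?_mem hmin
    have hisMin := PySem.List.min?_isMin hmin
    simp only [Option.getD_some]
    constructor
    · intro hj k hk
      have hgk : arr.getD k [] = arr[k] := by
        rw [List.getD_eq_getElem?_getD, List.getElem?_eq_getElem hk]; rfl
      have hmem2 : arr[k].length ∈ arr.map List.length :=
        List.mem_map.mpr ⟨arr[k], List.getElem_mem hk, rfl⟩
      rw [hgk]
      exact lt_of_lt_of_le hj (hisMin _ hmem2)
    · intro hall
      obtain ⟨row, hrow, hlenr⟩ := List.mem_map.mp hmem
      obtain ⟨k, hk, hkeq⟩ := List.mem_iff_getElem.mp hrow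
      have := hall k hk
      rw [List.getD_eq_getElem?_getD, List.getElem?_eq_getElem hk] at this
      simp only [Option.getD_some] at this
      rw [hkeq] at this
      rw [← hlenr]
      exact this

theorem owner_spec (arr : List (List Int)) (j : Nat) (hj : j < mval arr) (i : Nat) :
    ((ownerOf arr).getD j 0 = (i : Int) ↔
      (i < arr.length ∧ Gv arr i j = 1 ∧ ∀ u < arr.length, u ≠ i → Gv arr u j = 0)) := by
  unfold ownerOf Gv
  have hrep : (List.replicate (mval arr) (-1 : Int)).length = mval arr := by simp
  rw [owner_get (mval arr) _ _ hrep j hj]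
  have hrepg : (List.replicate (mval arr) (-1 : Int)).getD j 0 = -1 := by
    rw [List.getD_eq_getElem?_getD, List.getElem?_replicate]
    simp [hj]
  rw [hrepg]
  have h0 : PySem.List.enumerate arr = PySem.List.enumerate arr ((0 : Nat) : Int) := by norm_num
  rw [h0, colFold_enum j arr 0 i]
  constructor
  · rintro ⟨t, ht, hi, h1, hz⟩
    have : i = t := by omega
    subst this
    exact ⟨ht, h1, fun u hu hui => hz u hu hui⟩
  · rintro ⟨hi, h1, hz⟩
    exact ⟨i, hi, by omega, h1, fun u hu hui => hz u hu hui⟩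

theorem B_closed (arr : List (List Int)) (hne : arr ≠ []) :
    checkBasicPos_alt arr
    = (List.range arr.length).flatMap
        (fun i : Nat => ((List.range (mval arr)).filter
            (fun j => decide ((ownerOf arr).getD j 0 = (i : Int)))).map
          (fun j : Nat => [(i : Int), (j : Int)])) := by
  unfold checkBasicPos_alt
  rw [if_neg (by simp [hne])]
  have hinner : (fun (res : List (List Int)) (i : Nat) =>
      (List.range (mval arr)).foldl
        (fun (res : List (List Int)) (j : Nat) =>
          if (ownerOf arr).getD j 0 = (i : Int) then res ++ [[(i : Int), (j : Int)]] else res)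
        res)
      = fun (res : List (List Int)) (i : Nat) => res ++ ((List.range (mval arr)).filter
          (fun j => decide ((ownerOf arr).getD j 0 = (i : Int)))).map
          (fun j : Nat => [(i : Int), (j : Int)]) := by
    funext res i
    exact PySem.List.foldl_append_ite _ _ _ _
  show (List.range arr.length).foldl
      (fun (res : List (List Int)) (i : Nat) =>
        (List.range (mval arr)).foldl
          (fun (res : List (List Int)) (j : Nat) =>
            if (ownerOf arr).getD j 0 = (i : Int) then res ++ [[(i : Int), (j : Int)]] else res)
          res)
      [] = _
  rw [hinner, PySem.List.foldl_append_eq_flatMap]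
  simp

theorem filter_range_congr (a b : Nat) (p q : Nat → Bool)
    (h : ∀ j, (j < a ∧ p j = true) ↔ (j < b ∧ q j = true)) :
    (List.range a).filter p = (List.range b).filter q := by
  have key : ∀ (c r : Nat) (p : Nat → Bool), r ≤ c →
      (List.range c).filter (fun j => decide (j < r) && p j) = (List.range r).filter p := by
    intro c r p hrc
    have hc : c = r + (c - r) := by omega
    rw [hc, List.range_add, List.filter_append]
    have h1 : (List.range r).filter (fun j => decide (j < r) && p j) = (List.range r).filter p := by
      apply List.filter_congr
      intro j hj
      rw [List.mem_range] at hj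
      simp [hj]
    have h2 : ((List.range (c - r)).map (fun x => r + x)).filter (fun j => decide (j < r) && p j) = [] := by
      rw [List.filter_eq_nil_iff]
      intro a ha
      rw [List.mem_map] at ha
      obtain ⟨x, hx, rfl⟩ := ha
      simp
    rw [h1, h2, List.append_nil]
  have hpq : (fun j => decide (j < a) && p j) = (fun j => decide (j < b) && q j) := by
    funext j
    by_cases h1 : j < a ∧ p j = true
    · have h2 := (h j).mp h1
      simp [h1.1, h1.2, h2.1, h2.2]
    · have h2 : ¬(j < b ∧ q j = true) := fun hh => h1 ((h j).mpr hh)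
      have l1 : (decide (j < a) && p j) = false := by
        by_cases hja : j < a
        · by_cases hp : p j = true
          · exact absurd ⟨hja, hp⟩ h1
          · rw [Bool.not_eq_true] at hp; simp [hp]
        · simp [hja]
      have l2 : (decide (j < b) && q j) = false := by
        by_cases hjb : j < b
        · by_cases hq : q j = true
          · exact absurd ⟨hjb, hq⟩ h2
          · rw [Bool.not_eq_true] at hq; simp [hq]
        · simp [hjb]
      rw [l1, l2]
  rw [← key (max a b) a p (le_max_left a b), ← key (max a b) b q (le_max_right a b), hpq]

theorem flatMap_congr {α β : Type} (l : List α) (f g : α → List β)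
    (h : ∀ x ∈ l, f x = g x) : l.flatMap f = l.flatMap g := by
  induction l with
  | nil => rfl
  | cons x xs ih =>
    simp only [List.flatMap_cons]
    rw [h x List.mem_cons_self, ih fun y hy => h y (List.mem_cons_of_mem _ hy)]

-- ===== VERDICT (by name: the statement is the Claim_ definition above) =====
theorem checkBasicPos_spec : Claim_equal_checkBasicPos := by
  intro arr hdom hpre
  unfold Spec_checkBasicPos
  by_cases hne : arr = []
  · subst hne; rfl
  · have hn : 0 < arr.length := by
      cases arr with
      | nil => exact absurd rfl hne
      | cons x xs => simp
    rw [A_closed arr, B_closed arr hne]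
    apply flatMap_congr
    intro i hi
    rw [List.mem_range] at hi
    congr 1
    apply filter_range_congr
    intro j
    constructor
    · rintro ⟨hjl, hpa⟩
      rw [Bool.and_eq_true, beq_iff_eq] at hpa
      obtain ⟨h1, h2⟩ := hpa
      rw [List.range_eq_range'] at h2
      have hall := (kLoopA_spec arr i j arr.length 0 hn (by omega)).mp h2
      simp only [Gv] at hall
      have hallz : ∀ k, k < arr.length → k ≠ i → (arr.getD k []).getD j 0 = 0 :=
        fun k hk hki => hall k (Nat.zero_le k) hk hki
      have hjm : j < mval arr := by
        rw [mval_lt_iff arr hne j]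
        intro k hk
        unfold rlen
        by_cases hki : k = i
        · subst hki; exact hjl
        · by_contra hle
          rw [not_lt] at hle
          obtain ⟨k', hk'lt, hk'i, hjlt, hk'nz⟩ := hpre i hi j hjl h1 k hk hle
          exact hk'nz (hallz k' (by omega) hk'i)
      refine ⟨hjm, ?_⟩
      rw [decide_eq_true_eq]
      apply (owner_spec arr j hjm i).mpr
      exact ⟨hi, by simpa [Gv] using h1, fun u hu hui => by simpa [Gv] using hallz u hu hui⟩
    · rintro ⟨hjm, hpb⟩
      rw [decide_eq_true_eq] at hpb
      obtain ⟨hi', h1, hallz⟩ := (owner_spec arr j hjm i).mp hpb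
      have hjall := (mval_lt_iff arr hne j).mp hjm
      have hjl : j < (arr.getD i []).length := by
        have := hjall i hi
        unfold rlen at this
        exact this
      refine ⟨hjl, ?_⟩
      rw [Bool.and_eq_true, beq_iff_eq]
      refine ⟨by simpa [Gv] using h1, ?_⟩
      rw [List.range_eq_range']
      apply (kLoopA_spec arr i j arr.length 0 hn (by omega)).mpr
      intro k hk0 hk hki
      simpa [Gv] using hallz k hk hki
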